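-- pv_equiv track=rewrite | github.com/manas-17045/LeetcodeSolutions | Leetcode 2001-2100/2060/2060_2.py | possiblyEquals
-- ===== SOURCE A (Python) =====
-- from functools import lru_cache
--
-- def possiblyEquals(s1: str, s2: str) -> bool:
--     """
--     Determines if two strings s1 and s2 can be considered "possibly equal" based on specific rules.
--
--     Args:
--         s1 (str): The first string.
--         s2 (str): The second string.
--     Returns:
--         bool: True if the strings can be possibly equal, False otherwise.
--     """
--     n1, n2 = len(s1), len(s2)
--
--     @lru_cache(None)
--     def dfs(i: int, j: int, diff: int) -> bool:
--         if i == n1 and j == n2: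
--             return diff == 0
--
--         if diff > 0:
--             if j < n2 and s2[j].isalpha():
--                 if dfs(i, j + 1, diff - 1):
--                     return True
--
--             if j < n2 and s2[j].isdigit():
--                 num = 0
--                 for k in range(j, min(j + 3, n2)):
--                     if not s2[k].isdigit():
--                         break
--                     num = num * 10 + (ord(s2[k]) - 48)
--                     if dfs(i, k + 1, diff - num):
--                         return True
--
--             return False
--
--         if diff < 0:
--             if i < n1 and s1[i].isalpha():
--                 if dfs(i + 1, j, diff + 1):
--                     return True
--
--             if i < n1 and s1[i].isdigit():
--                 num = 0
--                 for k in range(i, min(i + 3, n1)):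
--                     if not s1[k].isdigit():
--                         break
--                     num = num * 10 + (ord(s1[k]) - 48)
--                     if dfs(k + 1, j, diff + num):
--                         return True
--
--             return False
--
--         if i < n1 and j < n2 and s1[i].isalpha() and s2[j].isalpha():
--             if s1[i] == s2[j] and dfs(i + 1, j + 1, 0):
--                 return True
--
--         if i < n1 and s1[i].isdigit():
--             num = 0
--             for k in range(i, min(i + 3, n1)):
--                 if not s1[k].isdigit():
--                     break
--                 num = num * 10 + (ord(s1[k]) - 48)
--                 if dfs(k + 1, j, num):
--                     return True
--
--         if j < n2 and s2[j].isdigit():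
--             num = 0
--             for k in range(j, min(j + 3, n2)):
--                 if not s2[k].isdigit():
--                     break
--                 num = num * 10 + (ord(s2[k]) - 48)
--                 if dfs(i, k + 1, -num):
--                     return True
--
--         return False
--
--     return dfs(0, 0, 0)
-- ===== SOURCE B (Python) =====
-- def possiblyEquals(s1: str, s2: str) -> bool:
--     """Iterative forward breadth-first search over states (i, j, diff) with a
--     frontier set, instead of recursive memoized DFS."""
--     n1, n2 = len(s1), len(s2)
--
--     def digit_runs(s, start, stop):
--         """(end_index, value) for each 1..3-digit run s[start:end]."""
--         out = []
--         num = 0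
--         for k in range(start, min(start + 3, stop)):
--             if not s[k].isdigit():
--                 break
--             num = num * 10 + ord(s[k]) - 48
--             out.append((k + 1, num))
--         return out
--
--     def succs(state):
--         i, j, d = state
--         if d > 0:
--             if j < n2:
--                 c = s2[j]
--                 if c.isalpha():
--                     return [(i, j + 1, d - 1)]
--                 if c.isdigit():
--                     return [(i, k, d - num) for k, num in digit_runs(s2, j, n2)]
--             return []
--         if d < 0:
--             if i < n1:
--                 c = s1[i]
--                 if c.isalpha():
--                     return [(i + 1, j, d + 1)]
--                 if c.isdigit():
--                     return [(k, j, d + num) for k, num in digit_runs(s1, i, n1)]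
--             return []
--         out = []
--         if (i < n1 and j < n2 and s1[i].isalpha() and s2[j].isalpha()
--                 and s1[i] == s2[j]):
--             out.append((i + 1, j + 1, 0))
--         out.extend((k, j, num) for k, num in digit_runs(s1, i, n1))
--         out.extend((i, k, -num) for k, num in digit_runs(s2, j, n2))
--         return out
--
--     target = (n1, n2, 0)
--     frontier = {(0, 0, 0)}
--     while frontier:
--         if target in frontier:
--             return True
--         frontier = {t for st in frontier for t in succs(st)}
--     return False
-- ===== Notes on version B (the rewrite author's own statement) =====
-- stated objective: alternative
-- what changed: Replaced the recursive lru_cache-memoized DFS over (i, j, diff) by an explicit iterative forward breadth-first search: a frontier set of states is repeatedly expanded by a successor function until the accepting state (n1, n2, 0) is found or the frontier empties.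
import Mathlib
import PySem

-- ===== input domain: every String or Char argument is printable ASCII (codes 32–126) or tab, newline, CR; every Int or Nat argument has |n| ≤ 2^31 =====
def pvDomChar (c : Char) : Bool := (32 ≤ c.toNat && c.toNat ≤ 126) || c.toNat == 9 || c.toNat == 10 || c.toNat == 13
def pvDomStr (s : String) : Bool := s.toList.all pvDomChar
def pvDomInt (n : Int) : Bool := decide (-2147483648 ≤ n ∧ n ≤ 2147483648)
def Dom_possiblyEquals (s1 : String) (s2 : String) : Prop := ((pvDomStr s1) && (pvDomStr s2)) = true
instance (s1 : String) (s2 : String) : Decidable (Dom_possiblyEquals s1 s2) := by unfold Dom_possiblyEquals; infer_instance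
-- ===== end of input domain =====

-- B replaces the recursive memoized DFS by an explicit iterative frontier search
-- over states (i, j, diff); objective: alternative (same asymptotic cost).

-- ===== PORT A =====
-- A's inner `for k in range(j, min(j+3, n2))` digit loop with `break`, running
-- accumulator `num`, and early `return True` on a successful dfs call; `call`
-- is the recursive dfs call made inside the loop (with one fuel unit less).
-- range(a, b) with a ≤ b is List.range' a (b - a); exact here since b ≥ a or empty.
def pvLoopA (s : List Char) (call : Nat → Int → Bool) : List Nat → Int → Bool
  | [], _ => false
  | k :: ks, num =>
    if ¬ (s.getD k ' ').isDigit then false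
    else
      let num' := num * 10 + (((s.getD k ' ').toNat : Int) - 48)
      if call (k + 1) num' then true else pvLoopA s call ks num'

-- A's dfs, transliterated branch for branch; the extra Nat fuel argument only
-- makes the same recursion total (each call strictly increases i + j, so fuel
-- n1 + n2 + 1 is never exhausted); lru_cache is a pure-function cache and is
-- dropped without affecting the result.
def pvDfsA (l1 l2 : List Char) (n1 n2 : Nat) : Nat → Nat → Nat → Int → Bool
  | 0, _, _, _ => false
  | f + 1, i, j, d =>
    if i = n1 ∧ j = n2 then d == 0
    else if d > 0 then
      (if j < n2 ∧ (l2.getD j ' ').isAlpha then pvDfsA l1 l2 n1 n2 f i (j + 1) (d - 1) else false) ||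
      (if j < n2 ∧ (l2.getD j ' ').isDigit then
         pvLoopA l2 (fun k nm => pvDfsA l1 l2 n1 n2 f i k (d - nm)) (List.range' j (min (j + 3) n2 - j)) 0
       else false)
    else if d < 0 then
      (if i < n1 ∧ (l1.getD i ' ').isAlpha then pvDfsA l1 l2 n1 n2 f (i + 1) j (d + 1) else false) ||
      (if i < n1 ∧ (l1.getD i ' ').isDigit then
         pvLoopA l1 (fun k nm => pvDfsA l1 l2 n1 n2 f k j (d + nm)) (List.range' i (min (i + 3) n1 - i)) 0
       else false)
    else
      (if i < n1 ∧ j < n2 ∧ (l1.getD i ' ').isAlpha ∧ (l2.getD j ' ').isAlpha ∧ l1.getD i ' ' = l2.getD j ' ' then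
         pvDfsA l1 l2 n1 n2 f (i + 1) (j + 1) 0
       else false) ||
      (if i < n1 ∧ (l1.getD i ' ').isDigit then
         pvLoopA l1 (fun k nm => pvDfsA l1 l2 n1 n2 f k j nm) (List.range' i (min (i + 3) n1 - i)) 0
       else false) ||
      (if j < n2 ∧ (l2.getD j ' ').isDigit then
         pvLoopA l2 (fun k nm => pvDfsA l1 l2 n1 n2 f i k (-nm)) (List.range' j (min (j + 3) n2 - j)) 0
       else false)

def possiblyEquals (s1 : String) (s2 : String) : Bool :=
  let l1 := s1.toList
  let l2 := s2.toList
  let n1 := l1.length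
  let n2 := l2.length
  pvDfsA l1 l2 n1 n2 (n1 + n2 + 1) 0 0 0

-- ===== PORT B =====
-- Source B's digit_runs: (end index, value) for each 1..3-digit run starting at `start`.
def pvDigitRuns (s : List Char) : List Nat → Int → List (Nat × Int)
  | [], _ => []
  | k :: ks, num =>
    if ¬ (s.getD k ' ').isDigit then []
    else
      let num' := num * 10 + (((s.getD k ' ').toNat : Int) - 48)
      (k + 1, num') :: pvDigitRuns s ks num'

-- Source B's succs(state).
def pvSuccs (l1 l2 : List Char) (n1 n2 : Nat) : Nat × Nat × Int → List (Nat × Nat × Int)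
  | (i, j, d) =>
    if d > 0 then
      if j < n2 then
        let c := l2.getD j ' '
        if c.isAlpha then [(i, j + 1, d - 1)]
        else if c.isDigit then
          (pvDigitRuns l2 (List.range' j (min (j + 3) n2 - j)) 0).map (fun p => (i, p.1, d - p.2))
        else []
      else []
    else if d < 0 then
      if i < n1 then
        let c := l1.getD i ' '
        if c.isAlpha then [(i + 1, j, d + 1)]
        else if c.isDigit then
          (pvDigitRuns l1 (List.range' i (min (i + 3) n1 - i)) 0).map (fun p => (p.1, j, d + p.2))
        else []
      else []
    else
      (if i < n1 ∧ j < n2 ∧ (l1.getD i ' ').isAlpha ∧ (l2.getD j ' ').isAlpha ∧ l1.getD i ' ' = l2.getD j ' ' then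
         [(i + 1, j + 1, (0 : Int))]
       else []) ++
      (pvDigitRuns l1 (List.range' i (min (i + 3) n1 - i)) 0).map (fun p => (p.1, j, p.2)) ++
      (pvDigitRuns l2 (List.range' j (min (j + 3) n2 - j)) 0).map (fun p => (i, p.1, -p.2))

-- Source B's `while frontier:` loop; the result does not depend on the order of the
-- frontier set, so the list representation is exact. Fuel only makes the loop
-- total: every successor strictly increases i + j ≤ n1 + n2, so the frontier
-- empties within n1 + n2 + 2 iterations.
def pvBfs (succs : Nat × Nat × Int → List (Nat × Nat × Int)) (target : Nat × Nat × Int) :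
    Nat → List (Nat × Nat × Int) → Bool
  | 0, _ => false
  | f + 1, fr =>
    if fr.isEmpty then false
    else if fr.contains target then true
    else pvBfs succs target f (PySem.Set.ofList (fr.flatMap succs))

def possiblyEquals_alt (s1 : String) (s2 : String) : Bool :=
  let l1 := s1.toList
  let l2 := s2.toList
  let n1 := l1.length
  let n2 := l2.length
  pvBfs (pvSuccs l1 l2 n1 n2) (n1, n2, 0) (n1 + n2 + 2) (PySem.Set.ofList [(0, 0, 0)])

-- ===== PRECONDITION & SPEC =====
def Spec_possiblyEquals (s1 : String) (s2 : String) (out : Bool) : Prop := out = possiblyEquals_alt s1 s2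
instance (s1 : String) (s2 : String) (out : Bool) : Decidable (Spec_possiblyEquals s1 s2 out) := by unfold Spec_possiblyEquals; infer_instance

-- ===== CLAIM (what is proved, stated in full; the proofs are below) =====
def Claim_equal_possiblyEquals : Prop := ∀ (s1 : String) (s2 : String), Dom_possiblyEquals s1 s2 → Spec_possiblyEquals s1 s2 (possiblyEquals s1 s2)

-- ===== LEMMAS AND PROOFS =====

-- reachability of the accepting state (n1, n2, 0) in exactly k steps of pvSuccs
inductive pvReach (l1 l2 : List Char) (n1 n2 : Nat) : Nat × Nat × Int → Nat → Prop
  | done : pvReach l1 l2 n1 n2 (n1, n2, 0) 0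
  | step {s s' : Nat × Nat × Int} {k : Nat} :
      s' ∈ pvSuccs l1 l2 n1 n2 s → pvReach l1 l2 n1 n2 s' k → pvReach l1 l2 n1 n2 s (k + 1)

theorem pv_alpha_not_digit (c : Char) (h : c.isAlpha = true) : c.isDigit = false := by
  cases hd : c.isDigit with
  | false => rfl
  | true =>
    exfalso
    simp only [Char.isAlpha, Char.isUpper, Char.isLower, Char.isDigit, Bool.or_eq_true,
      decide_eq_true_eq, Bool.and_eq_true, ge_iff_le] at h hd
    obtain ⟨h0, h9⟩ := hd
    rw [UInt32.le_iff_toNat_le] at h0 h9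
    have e9 : ('9' : Char).val.toNat = 57 := by decide
    have eA : ('A' : Char).val.toNat = 65 := by decide
    have ea : ('a' : Char).val.toNat = 97 := by decide
    rcases h with ⟨h1, h2⟩ | ⟨h1, h2⟩ <;> rw [UInt32.le_iff_toNat_le] at h1 h2 <;> omega

theorem pvLoopA_eq_any (s : List Char) (call : Nat → Int → Bool) (ks : List Nat) (num : Int) :
    pvLoopA s call ks num = (pvDigitRuns s ks num).any (fun p => call p.1 p.2) := by
  induction ks generalizing num with
  | nil => rfl
  | cons k ks ih =>
    cases hd : (s.getD k ' ').isDigit with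
    | false => simp only [pvLoopA, pvDigitRuns, hd, Bool.false_eq_true, not_false_iff,
        if_pos, List.any_nil]
    | true =>
      simp only [pvLoopA, pvDigitRuns, hd, not_true, if_false, List.any_cons, ih]
      cases hcall : call (k + 1) (num * 10 + (((s.getD k ' ').toNat : Int) - 48)) <;> simp_all

theorem pvDfsA_unfold (l1 l2 : List Char) (n1 n2 : Nat) (f i j : Nat) (d : Int) :
    pvDfsA l1 l2 n1 n2 (f + 1) i j d =
      (decide (i = n1 ∧ j = n2 ∧ d = 0) ||
        (pvSuccs l1 l2 n1 n2 (i, j, d)).any (fun s => pvDfsA l1 l2 n1 n2 f s.1 s.2.1 s.2.2)) := by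
  have hrunsEmpty : ∀ (s : List Char) (a b : Nat), ¬ a < b →
      pvDigitRuns s (List.range' a (min (a + 3) b - a)) 0 = [] := by
    intro s a b hab
    have h0 : min (a + 3) b - a = 0 := by omega
    rw [h0]
    rfl
  have hrunsNotDigit : ∀ (s : List Char) (a b : Nat), (s.getD a ' ').isDigit = false →
      pvDigitRuns s (List.range' a (min (a + 3) b - a)) 0 = [] := by
    intro s a b hd
    cases hlen : min (a + 3) b - a with
    | zero => rfl
    | succ m =>
      rw [List.range'_succ]
      simp only [pvDigitRuns, hd, Bool.false_eq_true, not_false_iff, if_pos]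
  by_cases hend : i = n1 ∧ j = n2
  · obtain ⟨rfl, rfl⟩ := hend
    rw [pvDfsA, if_pos ⟨rfl, rfl⟩]
    have h1 : pvSuccs l1 l2 i j (i, j, d) = [] := by
      simp only [pvSuccs]
      rcases lt_trichotomy d 0 with h | h | h
      · rw [if_neg (by omega : ¬ d > 0), if_pos h, if_neg (lt_irrefl i)]
      · subst h
        rw [if_neg (by omega : ¬ (0:Int) > 0), if_neg (by omega : ¬ (0:Int) < 0)]
        rw [hrunsEmpty l1 i i (lt_irrefl i), hrunsEmpty l2 j j (lt_irrefl j)]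
        rw [if_neg (by rintro ⟨hii, -⟩; exact lt_irrefl i hii)]
        rfl
      · rw [if_pos h, if_neg (lt_irrefl j)]
    rw [h1]
    by_cases hd : d = 0 <;> simp [hd]
  · have hdec : decide (i = n1 ∧ j = n2 ∧ d = 0) = false := by
      simp only [decide_eq_false_iff_not]
      rintro ⟨h1, h2, -⟩
      exact hend ⟨h1, h2⟩
    rw [pvDfsA, if_neg hend, hdec, Bool.false_or]
    simp only [pvSuccs]
    rcases lt_trichotomy d 0 with h | h | h
    · -- d < 0
      rw [if_neg (by omega : ¬ d > 0), if_pos h, if_neg (by omega : ¬ d > 0), if_pos h]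
      by_cases hi : i < n1
      · cases ha : (l1.getD i ' ').isAlpha with
        | true =>
          rw [if_pos ⟨hi, rfl⟩,
            if_neg (by rintro ⟨-, hc⟩; rw [pv_alpha_not_digit _ ha] at hc; cases hc),
            if_pos hi, if_pos rfl]
          simp
        | false =>
          cases hdg : (l1.getD i ' ').isDigit with
          | true =>
            rw [if_neg (by simp), if_pos ⟨hi, rfl⟩, if_pos hi, if_neg (by simp), if_pos rfl,
              pvLoopA_eq_any, List.any_map]
            rfl
          | false =>
            rw [if_neg (by simp), if_neg (by simp), if_pos hi, if_neg (by simp),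
              if_neg (by simp)]
            rfl
      · rw [if_neg (by rintro ⟨hc, -⟩; exact hi hc), if_neg (by rintro ⟨hc, -⟩; exact hi hc),
          if_neg hi]
        rfl
    · -- d = 0
      subst h
      rw [if_neg (by omega : ¬ (0:Int) > 0), if_neg (by omega : ¬ (0:Int) < 0),
        if_neg (by omega : ¬ (0:Int) > 0), if_neg (by omega : ¬ (0:Int) < 0)]
      rw [List.any_append, List.any_append]
      have c1 : (if i < n1 ∧ j < n2 ∧ (l1.getD i ' ').isAlpha ∧ (l2.getD j ' ').isAlpha ∧
            l1.getD i ' ' = l2.getD j ' ' then pvDfsA l1 l2 n1 n2 f (i + 1) (j + 1) 0 else false) =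
          (if i < n1 ∧ j < n2 ∧ (l1.getD i ' ').isAlpha ∧ (l2.getD j ' ').isAlpha ∧
            l1.getD i ' ' = l2.getD j ' ' then [(i + 1, j + 1, (0 : Int))] else []).any
            (fun s => pvDfsA l1 l2 n1 n2 f s.1 s.2.1 s.2.2) := by
        split_ifs with hm <;> simp
      have c2 : (if i < n1 ∧ (l1.getD i ' ').isDigit then
            pvLoopA l1 (fun k nm => pvDfsA l1 l2 n1 n2 f k j nm)
              (List.range' i (min (i + 3) n1 - i)) 0
          else false) =
          ((pvDigitRuns l1 (List.range' i (min (i + 3) n1 - i)) 0).map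
            (fun p => (p.1, j, p.2))).any (fun s => pvDfsA l1 l2 n1 n2 f s.1 s.2.1 s.2.2) := by
        by_cases hi : i < n1
        · cases hdg : (l1.getD i ' ').isDigit with
          | true =>
            rw [if_pos ⟨hi, rfl⟩, pvLoopA_eq_any, List.any_map]
            rfl
          | false =>
            rw [if_neg (by simp), hrunsNotDigit l1 i n1 hdg]
            rfl
        · rw [if_neg (by rintro ⟨hc, -⟩; exact hi hc), hrunsEmpty l1 i n1 hi]
          rfl
      have c3 : (if j < n2 ∧ (l2.getD j ' ').isDigit then
            pvLoopA l2 (fun k nm => pvDfsA l1 l2 n1 n2 f i k (-nm))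
              (List.range' j (min (j + 3) n2 - j)) 0
          else false) =
          ((pvDigitRuns l2 (List.range' j (min (j + 3) n2 - j)) 0).map
            (fun p => (i, p.1, -p.2))).any (fun s => pvDfsA l1 l2 n1 n2 f s.1 s.2.1 s.2.2) := by
        by_cases hj : j < n2
        · cases hdg : (l2.getD j ' ').isDigit with
          | true =>
            rw [if_pos ⟨hj, rfl⟩, pvLoopA_eq_any, List.any_map]
            rfl
          | false =>
            rw [if_neg (by simp), hrunsNotDigit l2 j n2 hdg]
            rfl
        · rw [if_neg (by rintro ⟨hc, -⟩; exact hj hc), hrunsEmpty l2 j n2 hj]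
          rfl
      rw [c1, c2, c3]
    · -- d > 0
      rw [if_pos h, if_pos h]
      by_cases hj : j < n2
      · cases ha : (l2.getD j ' ').isAlpha with
        | true =>
          rw [if_pos ⟨hj, rfl⟩,
            if_neg (by rintro ⟨-, hc⟩; rw [pv_alpha_not_digit _ ha] at hc; cases hc),
            if_pos hj, if_pos rfl]
          simp
        | false =>
          cases hdg : (l2.getD j ' ').isDigit with
          | true =>
            rw [if_neg (by simp), if_pos ⟨hj, rfl⟩, if_pos hj, if_neg (by simp), if_pos rfl,
              pvLoopA_eq_any, List.any_map]
            rfl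
          | false =>
            rw [if_neg (by simp), if_neg (by simp), if_pos hj, if_neg (by simp),
              if_neg (by simp)]
            rfl
      · rw [if_neg (by rintro ⟨hc, -⟩; exact hj hc), if_neg (by rintro ⟨hc, -⟩; exact hj hc),
          if_neg hj]
        rfl

theorem pvDigitRuns_fst (s : List Char) (ks : List Nat) (num : Int) (p : Nat × Int)
    (h : p ∈ pvDigitRuns s ks num) : ∃ k ∈ ks, p.1 = k + 1 := by
  induction ks generalizing num with
  | nil => rw [pvDigitRuns] at h; cases h
  | cons k ks ih =>
    rw [pvDigitRuns] at h
    split at h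
    · cases h
    · rcases List.mem_cons.1 h with h | h
      · exact ⟨k, by simp, by rw [h]⟩
      · obtain ⟨k', hk', he⟩ := ih _ h
        exact ⟨k', List.mem_cons_of_mem _ hk', he⟩

theorem pvSuccs_bound (l1 l2 : List Char) (n1 n2 : Nat) (i j : Nat) (d : Int)
    (s' : Nat × Nat × Int) (hi : i ≤ n1) (hj : j ≤ n2)
    (h : s' ∈ pvSuccs l1 l2 n1 n2 (i, j, d)) :
    s'.1 ≤ n1 ∧ s'.2.1 ≤ n2 ∧ i + j < s'.1 + s'.2.1 := by
  have hrun1 : ∀ (p : Nat × Int), p ∈ pvDigitRuns l1 (List.range' i (min (i + 3) n1 - i)) 0 →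
      i < p.1 ∧ p.1 ≤ n1 := by
    intro p hp
    obtain ⟨k, hk, he⟩ := pvDigitRuns_fst _ _ _ _ hp
    rw [List.mem_range'] at hk
    omega
  have hrun2 : ∀ (p : Nat × Int), p ∈ pvDigitRuns l2 (List.range' j (min (j + 3) n2 - j)) 0 →
      j < p.1 ∧ p.1 ≤ n2 := by
    intro p hp
    obtain ⟨k, hk, he⟩ := pvDigitRuns_fst _ _ _ _ hp
    rw [List.mem_range'] at hk
    omega
  simp only [pvSuccs] at h
  rcases lt_trichotomy d 0 with hd | hd | hd
  · rw [if_neg (by omega : ¬ d > 0), if_pos hd] at h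
    by_cases hin : i < n1
    · rw [if_pos hin] at h
      split at h
      · rw [List.mem_singleton] at h
        subst h
        exact ⟨by simpa using hin, by simpa using hj, by simp⟩
      · split at h
        · rw [List.mem_map] at h
          obtain ⟨p, hp, he⟩ := h
          have hb := hrun1 p hp
          subst he
          exact ⟨by simpa using hb.2, by simpa using hj, by simpa using hb.1⟩
        · cases h
    · rw [if_neg hin] at h
      cases h
  · subst hd
    rw [if_neg (by omega : ¬ (0:Int) > 0), if_neg (by omega : ¬ (0:Int) < 0)] at h
    rcases List.mem_append.1 h with h | h
    · rcases List.mem_append.1 h with h | h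
      · by_cases hm : i < n1 ∧ j < n2 ∧ (l1.getD i ' ').isAlpha = true ∧
            (l2.getD j ' ').isAlpha = true ∧ l1.getD i ' ' = l2.getD j ' '
        · rw [if_pos hm, List.mem_singleton] at h
          subst h
          obtain ⟨h1, h2, -⟩ := hm
          refine ⟨?_, ?_, ?_⟩ <;> simp <;> omega
        · rw [if_neg hm] at h
          cases h
      · rw [List.mem_map] at h
        obtain ⟨p, hp, he⟩ := h
        have hb := hrun1 p hp
        subst he
        exact ⟨by simpa using hb.2, by simpa using hj, by simpa using hb.1⟩
    · rw [List.mem_map] at h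
      obtain ⟨p, hp, he⟩ := h
      have hb := hrun2 p hp
      subst he
      exact ⟨by simpa using hi, by simpa using hb.2, by simpa using hb.1⟩
  · rw [if_pos hd] at h
    by_cases hjn : j < n2
    · rw [if_pos hjn] at h
      split at h
      · rw [List.mem_singleton] at h
        subst h
        exact ⟨by simpa using hi, by simpa using hjn, by simp⟩
      · split at h
        · rw [List.mem_map] at h
          obtain ⟨p, hp, he⟩ := h
          have hb := hrun2 p hp
          subst he
          exact ⟨by simpa using hi, by simpa using hb.2, by simpa using hb.1⟩
        · cases h
    · rw [if_neg hjn] at h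
      cases h

theorem pvReach_len (l1 l2 : List Char) (n1 n2 : Nat) (s : Nat × Nat × Int) (k : Nat)
    (h : pvReach l1 l2 n1 n2 s k) (hi : s.1 ≤ n1) (hj : s.2.1 ≤ n2) :
    k + s.1 + s.2.1 ≤ n1 + n2 := by
  induction h with
  | done => simp
  | @step s s' k hs hr ih =>
    have hb := pvSuccs_bound l1 l2 n1 n2 s.1 s.2.1 s.2.2 s' hi hj (by simpa using hs)
    have := ih hb.1 hb.2.1
    omega

theorem pvDfsA_sound (l1 l2 : List Char) (n1 n2 : Nat) (f : Nat) :
    ∀ (i j : Nat) (d : Int), pvDfsA l1 l2 n1 n2 f i j d = true →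
      ∃ k, pvReach l1 l2 n1 n2 (i, j, d) k := by
  induction f with
  | zero => intro i j d h; simp [pvDfsA] at h
  | succ f ih =>
    intro i j d h
    rw [pvDfsA_unfold] at h
    rw [Bool.or_eq_true] at h
    rcases h with h | h
    · simp only [decide_eq_true_eq] at h
      obtain ⟨e1, e2, e3⟩ := h; subst e1; subst e2; subst e3
      exact ⟨0, pvReach.done⟩
    · rw [List.any_eq_true] at h
      obtain ⟨s', hs', hd⟩ := h
      obtain ⟨k, hk⟩ := ih s'.1 s'.2.1 s'.2.2 hd
      exact ⟨k + 1, pvReach.step hs' hk⟩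

theorem pvDfsA_complete (l1 l2 : List Char) (n1 n2 : Nat) (s : Nat × Nat × Int) (k : Nat)
    (h : pvReach l1 l2 n1 n2 s k) :
    ∀ f, k < f → pvDfsA l1 l2 n1 n2 f s.1 s.2.1 s.2.2 = true := by
  induction h with
  | done =>
    intro f hf
    obtain ⟨m, rfl⟩ : ∃ m, f = m + 1 := ⟨f - 1, by omega⟩
    rw [pvDfsA_unfold]
    simp
  | @step s s' k hs hr ih =>
    intro f hf
    obtain ⟨m, rfl⟩ : ∃ m, f = m + 1 := ⟨f - 1, by omega⟩
    rw [pvDfsA_unfold, Bool.or_eq_true, List.any_eq_true]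
    exact Or.inr ⟨s', by simpa using hs, ih m (by omega)⟩

theorem pvBfs_sound (l1 l2 : List Char) (n1 n2 : Nat) (f : Nat) :
    ∀ fr : List (Nat × Nat × Int),
      pvBfs (pvSuccs l1 l2 n1 n2) (n1, n2, 0) f fr = true →
      ∃ s ∈ fr, ∃ k, pvReach l1 l2 n1 n2 s k := by
  induction f with
  | zero => intro fr h; simp [pvBfs] at h
  | succ f ih =>
    intro fr h
    rw [pvBfs] at h
    split_ifs at h with he hc
    · exact ⟨(n1, n2, 0), List.contains_iff_mem.1 hc, 0, pvReach.done⟩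
    · obtain ⟨s, hs, k, hk⟩ := ih _ h
      have hs' : s ∈ fr.flatMap (pvSuccs l1 l2 n1 n2) :=
        (PySem.Set.mem_ofList _ _).1 hs
      rw [List.mem_flatMap] at hs'
      obtain ⟨t, ht, hst⟩ := hs'
      exact ⟨t, ht, k + 1, pvReach.step hst hk⟩

theorem pvBfs_complete (l1 l2 : List Char) (n1 n2 : Nat) (s : Nat × Nat × Int) (k : Nat)
    (h : pvReach l1 l2 n1 n2 s k) :
    ∀ (f : Nat) (fr : List (Nat × Nat × Int)), s ∈ fr → k < f →
      pvBfs (pvSuccs l1 l2 n1 n2) (n1, n2, 0) f fr = true := by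
  induction h with
  | done =>
    intro f fr hmem hf
    obtain ⟨m, rfl⟩ : ∃ m, f = m + 1 := ⟨f - 1, by omega⟩
    rw [pvBfs]
    have hne : fr.isEmpty = false := by
      cases fr with
      | nil => simp at hmem
      | cons a l => rfl
    rw [hne]
    simp only [Bool.false_eq_true, if_false]
    rw [if_pos (List.contains_iff_mem.2 hmem)]
  | @step s s' k hs hr ih =>
    intro f fr hmem hf
    obtain ⟨m, rfl⟩ : ∃ m, f = m + 1 := ⟨f - 1, by omega⟩
    rw [pvBfs]
    have hne : fr.isEmpty = false := by
      cases fr with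
      | nil => simp at hmem
      | cons a l => rfl
    rw [hne]
    simp only [Bool.false_eq_true, if_false]
    split_ifs with hc
    · rfl
    · refine ih m _ ?_ (by omega)
      refine (PySem.Set.mem_ofList _ _).2 ?_
      rw [List.mem_flatMap]
      exact ⟨s, hmem, hs⟩

theorem pv_main (l1 l2 : List Char) (n1 n2 : Nat) (h1 : n1 = l1.length) (h2 : n2 = l2.length) :
    pvDfsA l1 l2 n1 n2 (n1 + n2 + 1) 0 0 0 =
      pvBfs (pvSuccs l1 l2 n1 n2) (n1, n2, 0) (n1 + n2 + 2) (PySem.Set.ofList [(0, 0, 0)]) := by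
  have hiff1 : pvDfsA l1 l2 n1 n2 (n1 + n2 + 1) 0 0 0 = true →
      pvBfs (pvSuccs l1 l2 n1 n2) (n1, n2, 0) (n1 + n2 + 2) (PySem.Set.ofList [(0, 0, 0)]) = true := by
    intro h
    obtain ⟨k, hk⟩ := pvDfsA_sound l1 l2 n1 n2 _ 0 0 0 h
    have hlen := pvReach_len l1 l2 n1 n2 (0, 0, 0) k hk (by simp) (by simp)
    refine pvBfs_complete l1 l2 n1 n2 (0, 0, 0) k hk _ _ ?_ (by omega)
    exact (PySem.Set.mem_ofList _ _).2 (by simp)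
  have hiff2 : pvBfs (pvSuccs l1 l2 n1 n2) (n1, n2, 0) (n1 + n2 + 2) (PySem.Set.ofList [(0, 0, 0)]) = true →
      pvDfsA l1 l2 n1 n2 (n1 + n2 + 1) 0 0 0 = true := by
    intro h
    obtain ⟨s, hs, k, hk⟩ := pvBfs_sound l1 l2 n1 n2 _ _ h
    have : s = (0, 0, 0) := by
      have := (PySem.Set.mem_ofList _ _).1 hs
      simpa using this
    subst this
    have hlen := pvReach_len l1 l2 n1 n2 (0, 0, 0) k hk (by simp) (by simp)
    exact pvDfsA_complete l1 l2 n1 n2 (0, 0, 0) k hk _ (by omega)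
  cases ha : pvDfsA l1 l2 n1 n2 (n1 + n2 + 1) 0 0 0 with
  | true => exact (hiff1 ha).symm
  | false =>
    cases hb : pvBfs (pvSuccs l1 l2 n1 n2) (n1, n2, 0) (n1 + n2 + 2) (PySem.Set.ofList [(0, 0, 0)]) with
    | true => exact absurd (hiff2 hb) (by rw [ha]; simp)
    | false => rfl

-- ===== VERDICT (by name: the statement is the Claim_ definition above) =====
theorem possiblyEquals_spec : Claim_equal_possiblyEquals := by
  intro s1 s2 _
  unfold Spec_possiblyEquals possiblyEquals possiblyEquals_alt
  exact pv_main _ _ _ _ rfl rfl
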